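-- pv_equiv track=rewrite | github.com/taylorreece/code_competitions | facebook-hacker-cup/2017/round1a/1/solution.py | solve
-- ===== SOURCE A (Python) =====
-- def solve(m):
--     go = True
--     while go:
--         for i in range(len(m)):
--             if len(m[i])>1 and m[i][0] == '?' and m[i][1] != '?':
--                 m[i][0] = m[i][1]
--             for j in range(1,len(m[i])):
--                 if m[i][j] == '?':
--                     if m[i][j-1] != '?':
--                         m[i][j] = m[i][j-1]
--                     elif j < len(m[i])-1:
--                         m[i][j] = m[i][j+1]
--
--         go = False
--         if '?' in m[0]:
--             go = True
--             if len(set(m[0])) == 1: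
--                 m[0] = m[1]
--         for i in range(1,len(m)):
--             if '?' in m[i]:
--                 if len(set(m[i])) == 1:
--                     if len(set(m[i-1])) != 1 or m[i-1][0]!='?':
--                         m[i] = m[i-1]
--                     elif i < len(m)-1:
--                         m[i] = m[i+1]
--                 go = True
--     return '\n'.join([''.join(x) for x in m])
-- ===== SOURCE B (Python) =====
-- def solve(m):
--     # One horizontal fill pass per row, then one downward and one upward pass for
--     # all-'?' rows.  Returns the same string as the original; does not mutate m.
--     def fill(row):
--         first = next((c for c in row if c != '?'), None)
--         if first is None:
--             # [] stays []; a nonempty all-'?' row is "blank" -> None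
--             return [] if not row else None
--         out = []
--         prev = None
--         for c in row:
--             if c != '?':
--                 prev = c
--                 out.append(c)
--             else:
--                 out.append(prev if prev is not None else first)
--         return out
--
--     res = [fill(r) for r in m]
--     last = None
--     for i in range(len(res)):          # downward: blank row <- nearest row above
--         if res[i] is None:
--             if last is not None:
--                 res[i] = last
--         else:
--             last = res[i]
--     last = None
--     for i in range(len(res) - 1, -1, -1):  # upward: top blank block <- from below
--         if res[i] is None:
--             res[i] = last
--         else:
--             last = res[i]
--     return '\n'.join(''.join(x) for x in res)
-- ===== Notes on version B (the rewrite author's own statement) =====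
-- stated objective: alternative
-- what changed: Replaces A's repeated whole-grid fix-point passes (a while-loop that re-scans every row and re-copies blank rows until no '?' remains) by a single left-to-right fill pass per row plus one downward and one upward pass that resolve the all-'?' rows.
import Mathlib
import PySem

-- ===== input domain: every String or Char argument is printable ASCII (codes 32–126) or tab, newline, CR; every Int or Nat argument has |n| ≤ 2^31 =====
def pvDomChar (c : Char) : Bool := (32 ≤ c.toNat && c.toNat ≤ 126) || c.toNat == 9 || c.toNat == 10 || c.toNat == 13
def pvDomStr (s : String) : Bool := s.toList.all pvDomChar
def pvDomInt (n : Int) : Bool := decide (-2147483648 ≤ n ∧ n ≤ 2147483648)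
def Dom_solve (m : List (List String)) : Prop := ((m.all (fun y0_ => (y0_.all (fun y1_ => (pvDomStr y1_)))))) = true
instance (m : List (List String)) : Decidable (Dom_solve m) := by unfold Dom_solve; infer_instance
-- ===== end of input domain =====

-- B replaces A's repeated whole-grid fix-point passes by one horizontal fill pass
-- per row plus one downward and one upward pass over all-'?' rows.
-- A mutates its argument in place; B does not — the equivalence proved here is
-- about the return value only.

-- ===== PORT A =====
-- inner loop 'for j in range(1,len(m[i]))' of A: prev is the (already updated)
-- left neighbour m[i][j-1]; the head of rest is the not-yet-visited m[i][j+1]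
def pvScanRow (prev : String) : List String → List String
  | [] => []
  | c :: rest =>
    if c = "?" then
      if prev ≠ "?" then prev :: pvScanRow prev rest
      else
        match rest with
        | [] => c :: pvScanRow c rest
        | nxt :: _ => nxt :: pvScanRow nxt rest
    else c :: pvScanRow c rest

-- one iteration of A's row loop on row i: the '?'-at-position-0 pre-check, then the inner loop
def pvRowPass : List String → List String
  | [] => []
  | [c] => [c]
  | a :: b :: rest =>
    let a' := if a = "?" ∧ b ≠ "?" then b else a
    a' :: pvScanRow a' (b :: rest)

-- A's 'for i in range(1,len(m))' copy loop: prev is the (already updated) row m[i-1],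
-- the head of rest is the not-yet-visited m[i+1]; Bool = '?' was seen (go)
def pvCopyScan (prev : List String) : List (List String) → List (List String) × Bool
  | [] => ([], false)
  | r :: rest =>
    if "?" ∈ r then
      let r' := if (PySem.Set.ofList r).length = 1 then
                  (if (PySem.Set.ofList prev).length ≠ 1 ∨ PySem.List.pyGet? prev 0 ≠ some "?" then prev
                   else match rest with
                        | [] => r
                        | nxt :: _ => nxt)
                else r
      let p := pvCopyScan r' rest
      (r' :: p.1, true)
    else
      let p := pvCopyScan r rest
      (r :: p.1, p.2)

-- one iteration of A's while-loop body: the row passes, then the m[0] block, then the copy loop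
def pvPass (m : List (List String)) : List (List String) × Bool :=
  let m1 := m.map pvRowPass
  match m1 with
  | [] => ([], false)   -- Python raises IndexError on m = [] (outside Pre_solve)
  | r0 :: rest =>
    if "?" ∈ r0 then
      let r0' := if (PySem.Set.ofList r0).length = 1 then
                   (match rest with
                    | [] => r0   -- Python raises IndexError here (outside Pre_solve)
                    | r1 :: _ => r1)
                 else r0
      let p := pvCopyScan r0' rest
      (r0' :: p.1, true)
    else
      let p := pvCopyScan r0 rest
      (r0 :: p.1, p.2)

-- A's 'while go' loop, clocked with fuel; pvFuel is proved sufficient on Pre_solve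
def pvLoop : Nat → List (List String) → List (List String)
  | 0, m => m
  | n + 1, m =>
    let p := pvPass m
    if p.2 then pvLoop n p.1 else p.1

def pvMaxLen (m : List (List String)) : Nat := (m.map List.length).foldl Nat.max 0

def pvFuel (m : List (List String)) : Nat :=
  (m.length * pvMaxLen m + 1) * m.length + m.length * pvMaxLen m + 1

def solve (m : List (List String)) : String :=
  PySem.Str.join "\n" ((pvLoop (pvFuel m) m).map (fun r => PySem.Str.join "" r))

-- ===== PORT B =====
-- Source B fill(row): scan with 'prev' = last non-'?' seen, 'f' = first non-'?' of the row
def altGo (f : String) (prev : Option String) : List String → List String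
  | [] => []
  | c :: rest =>
    if c ≠ "?" then c :: altGo f (some c) rest
    else (prev.getD f) :: altGo f prev rest

def altFill (row : List String) : Option (List String) :=
  match row.find? (fun c => c ≠ "?") with
  | none => if row = [] then some [] else none   -- nonempty all-'?' row is blank
  | some f => some (altGo f none row)

-- Source B downward pass: blank row takes the nearest filled row above
def altDown (last : Option (List String)) : List (Option (List String)) → List (Option (List String))
  | [] => []
  | x :: xs =>
    match x with
    | none => (match last with | some l => some l | none => none) :: altDown last xs
    | some r => some r :: altDown (some r) xs

-- Source B upward pass (runs bottom-to-top): snd is the running 'last'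
def altUp : List (Option (List String)) → List (Option (List String)) × Option (List String)
  | [] => ([], none)
  | x :: xs =>
    let p := altUp xs
    match x with
    | none => (p.2 :: p.1, p.2)
    | some r => (some r :: p.1, some r)

def solve_alt (m : List (List String)) : String :=
  let res := m.map altFill
  let res1 := altDown none res
  let res2 := (altUp res1).1
  PySem.Str.join "\n" (res2.map (fun o => PySem.Str.join "" (o.getD [])))

-- ===== PRECONDITION & SPEC =====
-- Pre_solve excludes exactly the inputs on which A does not return normally: the empty
-- grid and a grid whose first row is its only row and is all-'?' raise IndexError, and
-- a nonempty grid in which EVERY row is a nonempty all-'?' row makes A's while-loop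
-- spin forever; on every other input A returns.
def Pre_solve (m : List (List String)) : Prop :=
  m ≠ [] ∧ ∃ r ∈ m, (r = [] ∨ ∃ c ∈ r, c ≠ "?")
instance (m : List (List String)) : Decidable (Pre_solve m) := by unfold Pre_solve; infer_instance

def pvWitness_solve : List (List String) := [["?", "a"], ["?"]]

def Spec_solve (m : List (List String)) (out : String) : Prop := out = solve_alt m
instance (m : List (List String)) (out : String) : Decidable (Spec_solve m out) := by unfold Spec_solve; infer_instance

-- ===== CLAIM (what is proved, stated in full; the proofs are below) =====
def Claim_equal_solve : Prop := ∀ (m : List (List String)), Dom_solve m → Pre_solve m → Spec_solve m (solve m)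

-- ===== LEMMAS AND PROOFS =====

-- `nqb s` = s is a nonempty all-'?' row (the rows A's copy loop replaces)
def nqb (s : List String) : Bool := !s.isEmpty && s.all (· == "?")

-- number of '?' cells of a row
def cq (s : List String) : Nat := s.count "?"

-- `OkRow gp aq g s`: s is a partially filled version of a row whose final value is g:
-- g is '?'-free, the non-'?' cells of s already agree with g, a '?' cell's target
-- equals the previous target (gp = target of the cell to the left), and while the
-- row so far (aq) is all '?' the target also equals the next cell's target.
def OkRow : Option String → Bool → List String → List String → Prop
  | _, _, [], [] => True
  | gp, aq, g :: gs, s :: ss =>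
      g ≠ "?" ∧ (s ≠ "?" → s = g) ∧ (s = "?" → ∀ x, gp = some x → g = x) ∧
      (s = "?" → aq = true → ∀ y ∈ gs.head?, g = y) ∧
      OkRow (some g) (aq && (s == "?")) gs ss
  | _, _, _, _ => False

-- per-row invariant: an all-'?' row must come from an all-'?' original row;
-- otherwise the row is a partial fill of its target g
def RowInv (r g s : List String) : Prop :=
  (nqb s = true → nqb r = true) ∧ (nqb s = true ∨ OkRow none true g s)

def GridInv : List (List String) → List (List String) → List (List String) → Prop
  | [], [], [] => True
  | r :: rs, g :: gs, s :: ss => RowInv r g s ∧ GridInv rs gs ss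
  | _, _, _ => False

-- chain structure of the target grid: a blank row's target equals the target above;
-- while everything so far (AB) is blank it also equals the target below
def Chain : Option (List String) → Prop → List (List String) → List (List String) → Prop
  | _, _, [], [] => True
  | gp, AB, r :: rs, g :: gs =>
      (nqb r = true → ∀ x, gp = some x → g = x) ∧
      (AB → nqb r = true → ∀ y ∈ gs.head?, g = y) ∧
      Chain (some g) (AB ∧ nqb r = true) rs gs
  | _, _, _, _ => False

def targetGrid (m : List (List String)) : List (List String) :=
  ((altUp (altDown none (m.map altFill))).1).map (fun o => o.getD [])

-- measure
def cnt (ss : List (List String)) : Nat := ss.countP (fun s => nqb s)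
def qsum (ss : List (List String)) : Nat := (ss.map (fun s => if nqb s then 0 else cq s)).sum
def mu (m : List (List String)) (ss : List (List String)) : Nat :=
  (m.length * pvMaxLen m + 1) * cnt ss + qsum ss

theorem nqb_iff (s : List String) : nqb s = true ↔ (s ≠ [] ∧ ∀ c ∈ s, c = "?") := by
  simp [nqb, List.all_eq_true]

theorem nq_has_q {s : List String} (h : nqb s = true) : "?" ∈ s := by
  rcases (nqb_iff s).1 h with ⟨hne, hall⟩
  cases s with
  | nil => simp at hne
  | cons a t => have := hall a (by simp); simp [← this]

theorem setlen_one_iff (r : List String) :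
    (PySem.Set.ofList r).length = 1 ↔ (r ≠ [] ∧ ∃ a, ∀ x ∈ r, x = a) := by
  constructor
  · intro h
    rcases List.length_eq_one_iff.1 h with ⟨a, ha⟩
    constructor
    · rintro rfl; simp [PySem.Set.ofList_nil] at ha
    · exact ⟨a, fun x hx => by
        have : x ∈ PySem.Set.ofList r := (PySem.Set.mem_ofList _ _).2 hx
        rw [ha] at this; simpa using this⟩
  · rintro ⟨hne, a, ha⟩
    have hmem : a ∈ PySem.Set.ofList r := by
      rcases List.exists_mem_of_ne_nil r hne with ⟨x, hx⟩
      have := ha x hx; subst this; exact (PySem.Set.mem_ofList _ _).2 hx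
    have hnd : (PySem.Set.ofList r).Nodup := PySem.Set.nodup_ofList r
    have hsub : ∀ x ∈ PySem.Set.ofList r, x = a := fun x hx =>
      ha x ((PySem.Set.mem_ofList _ _).1 hx)
    -- a nodup list all of whose elements are a has length 1 (it is nonempty)
    rcases List.length_eq_one_iff (l := PySem.Set.ofList r) with ⟨_, _⟩
    cases hl : PySem.Set.ofList r with
    | nil => rw [hl] at hmem; simp at hmem
    | cons x t =>
      cases t with
      | nil => simp
      | cons y u =>
        rw [hl] at hnd hsub
        have hx : x = a := hsub x (by simp)
        have hy : y = a := hsub y (by simp)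
        simp [hx, hy] at hnd

theorem condA_iff (r : List String) :
    ("?" ∈ r ∧ (PySem.Set.ofList r).length = 1) ↔ nqb r = true := by
  rw [setlen_one_iff, nqb_iff]
  constructor
  · rintro ⟨hq, hne, a, ha⟩
    refine ⟨hne, fun c hc => ?_⟩
    rw [ha c hc, ← ha "?" hq]
  · rintro ⟨hne, hall⟩
    exact ⟨nq_has_q ((nqb_iff r).2 ⟨hne, hall⟩), hne, "?", hall⟩

theorem condPrev_iff (p : List String) :
    ((PySem.Set.ofList p).length ≠ 1 ∨ PySem.List.pyGet? p 0 ≠ some "?") ↔ nqb p = false := by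
  constructor
  · intro h
    cases hn : nqb p
    · rfl
    · exfalso
      rcases (nqb_iff p).1 hn with ⟨hne, hall⟩
      rcases h with h | h
      · exact h ((setlen_one_iff p).2 ⟨hne, "?", hall⟩)
      · cases p with
        | nil => exact hne rfl
        | cons a t =>
          have : a = "?" := hall a (by simp)
          rw [PySem.List.pyGet?_zero] at h
          simp [this] at h
  · intro h
    by_contra hc
    push Not at hc
    rcases hc with ⟨h1, h2⟩
    rcases (setlen_one_iff p).1 h1 with ⟨hne, a, ha⟩
    have hq : nqb p = true := by
      refine (nqb_iff p).2 ⟨hne, fun c hc => ?_⟩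
      have hc' := ha c hc
      cases p with
      | nil => exact absurd rfl hne
      | cons x t =>
        rw [PySem.List.pyGet?_zero] at h2
        simp at h2
        rw [hc', ← ha x (by simp), h2]
    rw [hq] at h; exact Bool.true_eq_false.mp h

theorem scan_nil (p : String) : pvScanRow p [] = [] := rfl

theorem scan_cons_fill {p : String} (hp : p ≠ "?") (rest : List String) :
    pvScanRow p ("?" :: rest) = p :: pvScanRow p rest := by
  rw [pvScanRow.eq_def]
  simp [hp]

theorem scan_cons_qq_nil : pvScanRow "?" ["?"] = ["?"] := rfl

theorem scan_cons_qq (nxt : String) (r' : List String) :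
    pvScanRow "?" ("?" :: nxt :: r') = nxt :: pvScanRow nxt (nxt :: r') := by
  rw [pvScanRow.eq_def]
  simp

theorem scan_cons_nq {c : String} (hc : c ≠ "?") (p : String) (rest : List String) :
    pvScanRow p (c :: rest) = c :: pvScanRow c rest := by
  rw [pvScanRow.eq_def]
  simp [hc]

theorem scan_qfree : ∀ (s : List String) (p : String), p ≠ "?" → "?" ∉ pvScanRow p s := by
  intro s
  induction s with
  | nil => intro p hp; simp [scan_nil]
  | cons c rest ih =>
    intro p hp
    by_cases hc : c = "?"
    · subst hc
      rw [scan_cons_fill hp]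
      simp [hp]
      exact ⟨fun h => hp h.symm, ih p hp⟩
    · rw [scan_cons_nq hc]
      simp
      exact ⟨fun h => hc h.symm, ih c hc⟩

theorem cq_cons (c : String) (t : List String) :
    cq (c :: t) = (if c = "?" then 1 else 0) + cq t := by
  simp [cq, List.count_cons]
  by_cases h : c = "?" <;> simp [h, Nat.add_comm]

theorem cq_qfree {s : List String} (h : "?" ∉ s) : cq s = 0 := by
  simpa [cq, List.count_eq_zero] using h

theorem cq_pos {s : List String} (h : "?" ∈ s) : 0 < cq s := by
  simpa [cq, List.count_pos_iff] using h

theorem scan_cq_le : ∀ (s : List String) (p : String), cq (pvScanRow p s) ≤ cq s := by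
  intro s
  induction s with
  | nil => intro p; simp [scan_nil]
  | cons c rest ih =>
    intro p
    by_cases hc : c = "?"
    · subst hc
      by_cases hp : p = "?"
      · subst hp
        cases rest with
        | nil => simp [scan_cons_qq_nil]
        | cons nxt r' =>
          rw [scan_cons_qq, cq_cons, cq_cons]
          by_cases hn : nxt = "?"
          · subst hn
            have h1 := ih "?"
            have h2 := cq_cons "?" r'
            simp at h2 ⊢
            omega
          · have h1 := ih nxt
            have h2 := cq_cons nxt r'
            simp [hn] at h2 ⊢
            omega
      · rw [scan_cons_fill hp, cq_cons, cq_cons, if_neg hp]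
        have := ih p
        simp; omega
    · rw [scan_cons_nq hc, cq_cons, cq_cons]
      have := ih c
      omega

theorem scan_progress : ∀ (s : List String), "?" ∈ s → (∃ c ∈ s, c ≠ "?") →
    cq (pvScanRow "?" s) < cq s := by
  intro s
  induction s with
  | nil => simp
  | cons c rest ih =>
    intro hq hex
    by_cases hc : c = "?"
    · subst hc
      cases rest with
      | nil =>
        rcases hex with ⟨x, hx, hxne⟩
        simp at hx
        exact absurd hx hxne
      | cons nxt r' =>
        rw [scan_cons_qq]
        by_cases hn : nxt = "?"
        · subst hn
          have hex' : ∃ x ∈ "?" :: r', x ≠ "?" := by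
            rcases hex with ⟨x, hx, hxne⟩
            rcases List.mem_cons.1 hx with rfl | hx'
            · exact absurd rfl hxne
            · exact ⟨x, hx', hxne⟩
          have h1 := ih (by simp) hex'
          have h2 := cq_cons "?" r'
          rw [cq_cons, cq_cons]
          simp at h2 ⊢
          omega
        · have h1 : "?" ∉ pvScanRow nxt (nxt :: r') := scan_qfree _ nxt hn
          rw [cq_cons, cq_cons, if_neg hn, cq_qfree h1, if_pos rfl, cq_cons]
          simp [hn]
    · have h1 : "?" ∉ pvScanRow c rest := scan_qfree _ c hc
      have hqr : "?" ∈ rest := by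
        rcases List.mem_cons.1 hq with h | h
        · exact absurd h.symm hc
        · exact h
      rw [scan_cons_nq hc, cq_cons, cq_cons, if_neg hc, cq_qfree h1]
      have := cq_pos hqr
      omega

theorem scan_mem_nonq : ∀ (s : List String) (p c : String), c ∈ s → c ≠ "?" → c ∈ pvScanRow p s := by
  intro s
  induction s with
  | nil => intro p c h; simp at h
  | cons a rest ih =>
    intro p c hmem hne
    rcases List.mem_cons.1 hmem with rfl | hmem'
    · rw [scan_cons_nq hne]; simp
    · by_cases ha : a = "?"
      · subst ha
        by_cases hp : p = "?"
        · subst hp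
          cases rest with
          | nil => simp at hmem'
          | cons nxt r' =>
            rw [scan_cons_qq]
            exact List.mem_cons_of_mem _ (ih nxt c hmem' hne)
        · rw [scan_cons_fill hp]
          exact List.mem_cons_of_mem _ (ih p c hmem' hne)
      · rw [scan_cons_nq ha]
        exact List.mem_cons_of_mem _ (ih a c hmem' hne)

theorem scan_allq : ∀ (s : List String), (∀ c ∈ s, c = "?") → pvScanRow "?" s = s := by
  intro s
  induction s with
  | nil => intro _; simp [scan_nil]
  | cons c rest ih =>
    intro h
    have hc : c = "?" := h c (by simp)
    subst hc
    cases rest with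
    | nil => exact scan_cons_qq_nil
    | cons nxt r' =>
      have hn : nxt = "?" := h nxt (by simp)
      subst hn
      have h' : ∀ x ∈ "?" :: r', x = "?" := fun x hx => h x (List.mem_cons_of_mem _ hx)
      rw [scan_cons_qq, ih h']

theorem okrow_cons_intro {gp : Option String} {aq : Bool} {g s : String} {gs ss : List String}
    (h1 : g ≠ "?") (h2 : s ≠ "?" → s = g) (h3 : s = "?" → ∀ x, gp = some x → g = x)
    (h4 : s = "?" → aq = true → ∀ y ∈ gs.head?, g = y)
    (h5 : OkRow (some g) (aq && (s == "?")) gs ss) : OkRow gp aq (g :: gs) (s :: ss) := by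
  simp only [OkRow]
  exact ⟨h1, h2, h3, h4, h5⟩

theorem okrow_cons_elim {gp : Option String} {aq : Bool} {g s : String} {gs ss : List String}
    (h : OkRow gp aq (g :: gs) (s :: ss)) :
    g ≠ "?" ∧ (s ≠ "?" → s = g) ∧ (s = "?" → ∀ x, gp = some x → g = x) ∧
    (s = "?" → aq = true → ∀ y ∈ gs.head?, g = y) ∧
    OkRow (some g) (aq && (s == "?")) gs ss := by
  simp only [OkRow] at h
  exact h

theorem okrow_nil_nil (gp : Option String) (aq : Bool) : OkRow gp aq [] [] := by
  simp [OkRow]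

theorem nqb_false_iff (s : List String) : nqb s = false ↔ (s = [] ∨ ∃ c ∈ s, c ≠ "?") := by
  rw [← Bool.not_eq_true, nqb_iff]
  constructor
  · intro h
    by_cases hs : s = []
    · exact Or.inl hs
    · refine Or.inr ?_
      by_contra hc
      push Not at hc
      exact h ⟨hs, hc⟩
  · rintro (rfl | ⟨c, hc, hne⟩) ⟨hne', hall⟩
    · exact hne' rfl
    · exact hne (hall c hc)

theorem rowPass_cons₂ (a b : String) (rest : List String) :
    pvRowPass (a :: b :: rest) =
      (if a = "?" ∧ b ≠ "?" then b else a) ::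
        pvScanRow (if a = "?" ∧ b ≠ "?" then b else a) (b :: rest) := rfl

theorem rowPass_allq {s : List String} (h : nqb s = true) : pvRowPass s = s := by
  rcases (nqb_iff s).1 h with ⟨hne, hall⟩
  cases s with
  | nil => rfl
  | cons a t =>
    cases t with
    | nil => rfl
    | cons b rest =>
      have ha : a = "?" := hall a (by simp)
      have hb : b = "?" := hall b (by simp)
      rw [rowPass_cons₂]
      have hcond : ¬(a = "?" ∧ b ≠ "?") := by simp [ha, hb]
      rw [if_neg hcond, ha]
      have : ∀ c ∈ b :: rest, c = "?" := fun c hc => hall c (List.mem_cons_of_mem _ hc)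
      rw [scan_allq _ this]

theorem rowPass_nq (s : List String) : nqb (pvRowPass s) = nqb s := by
  cases h : nqb s
  · rcases (nqb_false_iff s).1 h with rfl | ⟨c, hc, hne⟩
    · rfl
    · refine (nqb_false_iff _).2 (Or.inr ?_)
      cases s with
      | nil => simp at hc
      | cons a t =>
        cases t with
        | nil =>
          simp at hc; subst hc
          exact ⟨c, by simp [pvRowPass], hne⟩
        | cons b rest =>
          rw [rowPass_cons₂]
          rcases List.mem_cons.1 hc with rfl | hc'
          · have hcond : ¬(c = "?" ∧ b ≠ "?") := by simp; intro hq; exact absurd hq hne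
            exact ⟨c, by rw [if_neg hcond]; simp, hne⟩
          · exact ⟨c, List.mem_cons_of_mem _ (scan_mem_nonq _ _ c hc' hne), hne⟩
  · rw [rowPass_allq h, h]

theorem rowPass_cq_le (s : List String) : cq (pvRowPass s) ≤ cq s := by
  cases s with
  | nil => simp [pvRowPass]
  | cons a t =>
    cases t with
    | nil => simp [pvRowPass]
    | cons b rest =>
      rw [rowPass_cons₂, cq_cons, cq_cons]
      have hs := scan_cq_le (b :: rest)
      by_cases hcond : a = "?" ∧ b ≠ "?"
      · rw [if_pos hcond]
        have := hs b
        simp [hcond.2, hcond.1]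
        omega
      · rw [if_neg hcond]
        have := hs a
        omega

theorem rowPass_progress {s : List String} (h : nqb s = false) (hq : "?" ∈ pvRowPass s) :
    cq (pvRowPass s) < cq s := by
  cases s with
  | nil => simp [pvRowPass] at hq
  | cons a t =>
    cases t with
    | nil =>
      simp [pvRowPass] at hq
      rcases (nqb_false_iff _).1 h with h' | ⟨c, hc, hne⟩
      · simp at h'
      · simp at hc; subst hc; exact absurd hq.symm hne
    | cons b rest =>
      rw [rowPass_cons₂] at hq ⊢
      by_cases ha' : (if a = "?" ∧ b ≠ "?" then b else a) = "?"
      · -- head of output is '?', hence a = '?' and b = '?'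
        have hab : a = "?" ∧ b = "?" := by
          by_cases hcond : a = "?" ∧ b ≠ "?"
          · rw [if_pos hcond] at ha'; exact absurd ha' hcond.2
          · rw [if_neg hcond] at ha'
            constructor
            · exact ha'
            · by_contra hb
              exact hcond ⟨ha', hb⟩
        rcases hab with ⟨ha, hb⟩
        have hcond : ¬(a = "?" ∧ b ≠ "?") := by simp [ha, hb]
        rw [if_neg hcond, ha] at hq ⊢
        rw [cq_cons, cq_cons, if_pos rfl]
        have hex : ∃ c ∈ b :: rest, c ≠ "?" := by
          rcases (nqb_false_iff _).1 h with h' | ⟨c, hc, hne⟩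
          · simp at h'
          · rcases List.mem_cons.1 hc with rfl | hc'
            · exact absurd ha hne
            · exact ⟨c, hc', hne⟩
        have := scan_progress (b :: rest) (by simp [hb]) hex
        omega
      · -- head non-'?': the scan output is '?'-free, contradiction with hq unless head…
        rcases List.mem_cons.1 hq with h' | h'
        · exact absurd h'.symm ha'
        · exact absurd h' (scan_qfree _ _ ha')

theorem okrow_len : ∀ (gs ss : List String) (gp : Option String) (aq : Bool),
    OkRow gp aq gs ss → ss.length = gs.length := by
  intro gs
  induction gs with
  | nil => intro ss gp aq h; cases ss with
    | nil => rfl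
    | cons s t => simp [OkRow] at h
  | cons g gs' ih =>
    intro ss gp aq h
    cases ss with
    | nil => simp [OkRow] at h
    | cons s ss' =>
      simp only [OkRow] at h
      simpa using ih ss' (some g) (aq && (s == "?")) h.2.2.2.2

theorem okrow_noq : ∀ (gs ss : List String) (gp : Option String) (aq : Bool),
    OkRow gp aq gs ss → "?" ∉ ss → ss = gs := by
  intro gs
  induction gs with
  | nil => intro ss gp aq h _; cases ss with
    | nil => rfl
    | cons s t => simp [OkRow] at h
  | cons g gs' ih =>
    intro ss gp aq h hnq
    cases ss with
    | nil => simp [OkRow] at h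
    | cons s ss' =>
      simp only [OkRow] at h
      obtain ⟨hg, h2, _, _, htail⟩ := h
      have hs : s ≠ "?" := fun hc => hnq (by simp [hc])
      rw [h2 hs, ih ss' (some g) (aq && (s == "?")) htail (fun hc => hnq (List.mem_cons_of_mem _ hc))]

theorem scan_ok : ∀ (ss gs : List String) (gp p : String) (aq aq' : Bool),
    OkRow (some gp) aq gs ss →
    (aq' = true → aq = true) →
    (p ≠ "?" → p = gp) →
    (p = "?" → aq = true) →
    OkRow (some gp) aq' gs (pvScanRow p ss) := by
  intro ss
  induction ss with
  | nil =>
    intro gs gp p aq aq' h _ _ _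
    cases gs with
    | nil => simp [scan_nil, OkRow]
    | cons g gs' => simp [OkRow] at h
  | cons s ss' ih =>
    intro gs gp p aq aq' h himp hp1 hp2
    cases gs with
    | nil => simp [OkRow] at h
    | cons g gs' =>
      obtain ⟨hg, h2, h3, h4, htail⟩ := okrow_cons_elim h
      by_cases hs : s = "?"
      · subst hs
        by_cases hp : p = "?"
        · subst hp
          cases ss' with
          | nil =>
            have hgs' : gs' = [] := by
              cases gs' with
              | nil => rfl
              | cons x y => simp [OkRow] at htail
            subst hgs'
            rw [scan_cons_qq_nil]
            exact okrow_cons_intro hg h2 h3 (fun h1 h2' y hy => h4 h1 (himp h2') y hy)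
              (okrow_nil_nil _ _)
          | cons nxt rest' =>
            rw [scan_cons_qq]
            have haq : aq = true := hp2 rfl
            cases gs' with
            | nil => simp [OkRow] at htail
            | cons g2 gs'' =>
              have hgg2 : g = g2 := h4 rfl haq g2 (by simp)
              have ht2 : nxt ≠ "?" → nxt = g2 := (okrow_cons_elim htail).2.1
              refine okrow_cons_intro hg (fun hnxt => (ht2 hnxt).trans hgg2.symm)
                (fun _ x hx => h3 rfl x hx)
                (fun _ haq' y hy => h4 rfl (himp haq') y hy) ?_
              apply ih (g2 :: gs'') g nxt (aq && ("?" == "?")) (aq' && (nxt == "?")) htail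
              · intro h'
                simp [haq]
              · intro hnxt
                exact (ht2 hnxt).trans hgg2.symm
              · intro _
                simp [haq]
        · rw [scan_cons_fill hp]
          have hpg : p = gp := hp1 hp
          have hggp : g = gp := h3 rfl gp rfl
          refine okrow_cons_intro hg (fun _ => hpg.trans hggp.symm) (fun hq x hx => absurd hq hp)
            (fun hq => absurd hq hp) ?_
          apply ih gs' g p (aq && ("?" == "?")) (aq' && (p == "?")) htail
          · intro h'
            simp [hp] at h'
          · intro _
            exact hpg.trans hggp.symm
          · intro hq
            exact absurd hq hp
      · rw [scan_cons_nq hs]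
        have hsg : s = g := h2 hs
        refine okrow_cons_intro hg (fun _ => hsg) (fun hq x hx => absurd hq hs)
          (fun hq => absurd hq hs) ?_
        apply ih gs' g s (aq && (s == "?")) (aq' && (s == "?")) htail
        · intro h'
          simp [hs] at h'
        · intro _
          exact hsg
        · intro hq
          exact absurd hq hs

theorem rowPass_ok {g s : List String} (h : OkRow none true g s) :
    OkRow none true g (pvRowPass s) := by
  cases s with
  | nil => simpa [pvRowPass] using h
  | cons a t =>
    cases t with
    | nil => simpa [pvRowPass] using h
    | cons b rest =>
      cases g with
      | nil => simp [OkRow] at h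
      | cons g0 g1s =>
        obtain ⟨hg0, h2, _, h4, htail⟩ := okrow_cons_elim h
        cases g1s with
        | nil => simp [OkRow] at htail
        | cons g1 gs'' =>
          have ht2 : b ≠ "?" → b = g1 := by
            have h' : OkRow (some g0) (true && (a == "?")) (g1 :: gs'') (b :: rest) := htail
            exact (okrow_cons_elim h').2.1
          rw [rowPass_cons₂]
          by_cases hcond : a = "?" ∧ b ≠ "?"
          · rw [if_pos hcond]
            have hbg : b = g0 := by
              have := h4 hcond.1 rfl g1 (by simp)
              rw [ht2 hcond.2, ← this]
            refine okrow_cons_intro hg0 (fun _ => hbg) (fun hq x hx => absurd hq hcond.2)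
              (fun hq => absurd hq hcond.2) ?_
            apply scan_ok (b :: rest) (g1 :: gs'') g0 b (true && (a == "?")) (true && (b == "?")) htail
            · intro h'
              simp [hcond.2] at h'
            · intro _
              exact hbg
            · intro hq
              exact absurd hq hcond.2
          · rw [if_neg hcond]
            refine okrow_cons_intro hg0 h2 (fun hq x hx => by simp at hx)
              (fun hq _ y hy => h4 hq rfl y hy) ?_
            apply scan_ok (b :: rest) (g1 :: gs'') g0 a (true && (a == "?")) (true && (a == "?")) htail
            · exact fun h' => h'
            · intro ha
              exact h2 ha
            · intro hq
              simp [hq]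

theorem chain_cons_intro {gp : Option (List String)} {AB : Prop} {r g : List String}
    {rs gs : List (List String)}
    (h1 : nqb r = true → ∀ x, gp = some x → g = x)
    (h2 : AB → nqb r = true → ∀ y ∈ gs.head?, g = y)
    (h3 : Chain (some g) (AB ∧ nqb r = true) rs gs) :
    Chain gp AB (r :: rs) (g :: gs) := by
  simp only [Chain]
  exact ⟨h1, h2, h3⟩

theorem chain_cons_elim {gp : Option (List String)} {AB : Prop} {r g : List String}
    {rs gs : List (List String)}
    (h : Chain gp AB (r :: rs) (g :: gs)) :
    (nqb r = true → ∀ x, gp = some x → g = x) ∧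
    (AB → nqb r = true → ∀ y ∈ gs.head?, g = y) ∧
    Chain (some g) (AB ∧ nqb r = true) rs gs := by
  simp only [Chain] at h
  exact h

theorem gridinv_cons_intro {r g s : List String} {rs gs ss : List (List String)}
    (h1 : RowInv r g s) (h2 : GridInv rs gs ss) : GridInv (r :: rs) (g :: gs) (s :: ss) := by
  simp only [GridInv]
  exact ⟨h1, h2⟩

theorem gridinv_cons_elim {r g s : List String} {rs gs ss : List (List String)}
    (h : GridInv (r :: rs) (g :: gs) (s :: ss)) : RowInv r g s ∧ GridInv rs gs ss := by
  simp only [GridInv] at h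
  exact h

theorem altGo_length : ∀ (r : List String) (f : String) (prev : Option String),
    (altGo f prev r).length = r.length := by
  intro r
  induction r with
  | nil => intro f prev; rfl
  | cons c rest ih =>
    intro f prev
    by_cases hc : c ≠ "?" <;> simp [altGo, hc, ih]

theorem fill_none_iff (r : List String) : altFill r = none ↔ nqb r = true := by
  unfold altFill
  cases hf : r.find? (fun c => c ≠ "?") with
  | none =>
    have hall : ∀ c ∈ r, c = "?" := by
      intro c hc
      have := List.find?_eq_none.1 hf c hc
      simpa using this
    cases r with
    | nil => simp [nqb]
    | cons a t =>
      have hnq : nqb (a :: t) = true := (nqb_iff _).2 ⟨by simp, hall⟩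
      simp [hnq]
  | some f =>
    have hf' : f ≠ "?" := by simpa using List.find?_some hf
    have hmem' : f ∈ r := List.mem_of_find?_eq_some hf
    have hnq : nqb r = false := (nqb_false_iff r).2 (Or.inr ⟨f, hmem', hf'⟩)
    simp [hnq]

theorem altGo_ok : ∀ (r : List String) (f : String) (prev gp : Option String) (aq : Bool),
    f ≠ "?" →
    (∀ x, prev = some x → x ≠ "?") →
    (aq = true → prev = none ∧ ∀ c, r.find? (fun c => c ≠ "?") = some c → c = f) →
    (∀ x, gp = some x → x = prev.getD f) →
    OkRow gp aq (altGo f prev r) r := by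
  intro r
  induction r with
  | nil => intro f prev gp aq _ _ _ _; exact okrow_nil_nil _ _
  | cons c rest ih =>
    intro f prev gp aq hf hprev haq hgp
    by_cases hc : c = "?"
    · subst hc
      have hgo : altGo f prev ("?" :: rest) = (prev.getD f) :: altGo f prev rest := by
        simp [altGo]
      rw [hgo]
      have hgne : prev.getD f ≠ "?" := by
        cases prev with
        | none => simpa using hf
        | some x => simpa using hprev x rfl
      refine okrow_cons_intro hgne (fun h => absurd rfl h)
        (fun _ x hx => ((hgp x hx)).symm) ?_ ?_
      · -- all-'?' so far: target equals the next cell's target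
        intro _ haq' y hy
        obtain ⟨hpn, hfind⟩ := haq haq'
        subst hpn
        cases rest with
        | nil => simp [altGo] at hy
        | cons c2 rest' =>
          by_cases hc2 : c2 = "?"
          · subst hc2
            simp [altGo] at hy
            simpa using hy
          · simp [altGo, hc2] at hy
            have : c2 = f := hfind c2 (by simp [hc2])
            simp [← hy, this]
      · apply ih f prev (some (prev.getD f)) (aq && ("?" == "?")) hf hprev
        · intro h'
          simp at h'
          obtain ⟨hpn, hfind⟩ := haq h'
          exact ⟨hpn, fun c hc => hfind c (by simpa [List.find?_cons] using hc)⟩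
        · intro x hx
          simpa using hx.symm
    · have hgo : altGo f prev (c :: rest) = c :: altGo f (some c) rest := by
        simp [altGo, hc]
      rw [hgo]
      refine okrow_cons_intro hc (fun _ => rfl) (fun hq => absurd hq hc) (fun hq => absurd hq hc) ?_
      apply ih f (some c) (some c) (aq && (c == "?"))  hf
      · intro x hx
        injection hx with hx'
        subst hx'
        exact hc
      · intro h'
        simp [hc] at h'
      · intro x hx
        injection hx with hx'
        simp [hx']

theorem fill_ok {r g : List String} (h : altFill r = some g) : OkRow none true g r := by
  unfold altFill at h
  cases hf : r.find? (fun c => c ≠ "?") with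
  | none =>
    rw [hf] at h
    by_cases hr : r = []
    · subst hr
      simp at h
      subst h
      exact okrow_nil_nil _ _
    · simp [hr] at h
  | some f =>
    rw [hf] at h
    simp at h
    subst h
    have hfne : f ≠ "?" := by simpa using List.find?_some hf
    apply altGo_ok r f none none true hfne
    · intro x hx; simp at hx
    · intro _
      exact ⟨rfl, fun c hc => by rw [hf] at hc; injection hc with h'; exact h'.symm⟩
    · intro x hx; simp at hx

-- first-some choice (Python's 'x if x is not None else y')
def oE (x y : Option (List String)) : Option (List String) :=
  match x with
  | some v => some v
  | none => y

theorem oE_none (y : Option (List String)) : oE none y = y := rfl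
theorem oE_some (v : List String) (y : Option (List String)) : oE (some v) y = some v := rfl

-- the downward pass, uniformly
theorem down_cons (a x : Option (List String)) (xs : List (Option (List String))) :
    altDown a (x :: xs) = oE x a :: altDown (oE x a) xs := by
  cases x <;> cases a <;> rfl

theorem down_mem : ∀ (l : List (Option (List String))) (a o), o ∈ altDown a l → o ∈ l ∨ o = a := by
  intro l
  induction l with
  | nil => intro a o h; simp [altDown] at h
  | cons x xs ih =>
    intro a o h
    rw [down_cons] at h
    rcases List.mem_cons.1 h with rfl | h'
    · cases x <;> simp [oE_none, oE_some]
    · rcases ih _ o h' with h'' | rfl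
      · exact Or.inl (List.mem_cons_of_mem _ h'')
      · cases x <;> simp [oE_none, oE_some]

theorem down_allSome : ∀ (l : List (Option (List String))) (v : List String),
    ∀ o ∈ altDown (some v) l, o ≠ none := by
  intro l
  induction l with
  | nil => intro v o h; simp [altDown] at h
  | cons x xs ih =>
    intro v o h
    rw [down_cons] at h
    rcases List.mem_cons.1 h with rfl | h'
    · cases x <;> simp [oE_none, oE_some]
    · cases x with
      | none => exact ih v o (by simpa [oE_none] using h')
      | some r => exact ih r o (by simpa [oE_some] using h')

theorem up_fst_allSome : ∀ (l : List (Option (List String))),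
    (∀ o ∈ l, o ≠ none) → (altUp l).1 = l := by
  intro l
  induction l with
  | nil => intro _; rfl
  | cons x xs ih =>
    intro h
    cases x with
    | none => exact absurd rfl (h none (by simp))
    | some r =>
      simp only [altUp]
      rw [ih (fun o ho => h o (List.mem_cons_of_mem _ ho))]

theorem up_down (l : List (Option (List String))) :
    (altUp (altDown none l)).1 = (altDown none l).map (fun y => oE y (l.findSome? id)) ∧
    (altUp (altDown none l)).2 = l.findSome? id := by
  induction l with
  | nil => exact ⟨rfl, rfl⟩
  | cons x xs ih =>
    cases x with
    | none =>
      rw [down_cons, oE_none]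
      obtain ⟨ih1, ih2⟩ := ih
      have hfs : List.findSome? id (none :: xs) = List.findSome? id xs := by
        simp [List.findSome?]
      simp only [altUp]
      constructor
      · simp only [List.map_cons, hfs, oE_none]
        rw [ih1, ih2]
      · rw [ih2, hfs]
    | some r =>
      rw [down_cons, oE_some]
      have hAS := down_allSome xs r
      have hfs : List.findSome? id (some r :: xs) = some r := by
        simp [List.findSome?]
      simp only [altUp]
      constructor
      · rw [up_fst_allSome _ hAS]
        simp only [List.map_cons, hfs, oE_some]
        have : ∀ o ∈ altDown (some r) xs, oE o (some r) = o := by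
          intro o ho
          cases o with
          | none => exact absurd rfl (hAS none ho)
          | some v => rfl
        rw [List.map_congr_left this, List.map_id']
      · rw [hfs]

def gsOf (t a : Option (List String)) : List (List String) → List (List String)
  | [] => []
  | r :: rs => (oE (oE (altFill r) a) t).getD [] :: gsOf t (oE (altFill r) a) rs

theorem down_map_gsOf (t : Option (List String)) :
    ∀ (rs : List (List String)) (a : Option (List String)),
    (altDown a (rs.map altFill)).map (fun y => (oE y t).getD []) = gsOf t a rs := by
  intro rs
  induction rs with
  | nil => intro a; rfl
  | cons r rs' ih =>
    intro a
    simp only [List.map_cons]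
    rw [down_cons]
    simp only [List.map_cons, gsOf]
    rw [ih]

theorem targetGrid_eq (m : List (List String)) :
    targetGrid m = gsOf ((m.map altFill).findSome? id) none m := by
  unfold targetGrid
  rw [(up_down (m.map altFill)).1, List.map_map]
  have : ((fun o => o.getD []) ∘ fun y => oE y ((m.map altFill).findSome? id)) =
      fun y => (oE y ((m.map altFill).findSome? id)).getD [] := rfl
  rw [this]
  exact down_map_gsOf _ m none

theorem chain_gsOf : ∀ (rs : List (List String)) (a gp : Option (List String)) (AB : Prop)
    (t : Option (List String)),
    (∀ x, gp = some x → x = (oE a t).getD []) →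
    (AB → a = none) →
    (AB → t = (rs.map altFill).findSome? id) →
    Chain gp AB rs (gsOf t a rs) := by
  intro rs
  induction rs with
  | nil => intro a gp AB t _ _ _; simp [gsOf, Chain]
  | cons r rs' ih =>
    intro a gp AB t h1 h2 h3
    simp only [gsOf]
    apply chain_cons_intro
    · intro hnq x hx
      rw [h1 x hx, (fill_none_iff r).2 hnq, oE_none]
    · intro hAB hnq y hy
      have ha : a = none := h2 hAB
      have ht : t = ((r :: rs').map altFill).findSome? id := h3 hAB
      have hfr : altFill r = none := (fill_none_iff r).2 hnq
      subst ha
      rw [hfr, oE_none, oE_none]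
      cases rs' with
      | nil => simp [gsOf] at hy
      | cons r2 rs'' =>
        simp only [gsOf, List.head?_cons, Option.mem_def, Option.some.injEq] at hy
        rw [hfr, oE_none] at hy
        have ht' : t = ((r2 :: rs'').map altFill).findSome? id := by
          rw [ht]; simp [List.findSome?, hfr]
        cases hf2 : altFill r2 with
        | none =>
          rw [hf2, oE_none, oE_none] at hy
          exact hy
        | some h =>
          rw [hf2, oE_some] at hy
          have hth : t = some h := by
            rw [ht']
            simp [List.findSome?, hf2]
          rw [hth]
          simp only [oE_some, Option.getD_some] at hy ⊢
          exact hy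
    · apply ih
      · intro x hx
        injection hx with hx'
        exact hx'.symm
      · intro hAB'
        rw [h2 hAB'.1, (fill_none_iff r).2 hAB'.2, oE_none]
      · intro hAB'
        rw [h3 hAB'.1]
        simp [List.findSome?, (fill_none_iff r).2 hAB'.2]

theorem gridinv_init : ∀ (rs : List (List String)) (a t : Option (List String)),
    GridInv rs (gsOf t a rs) rs := by
  intro rs
  induction rs with
  | nil => intro a t; simp [gsOf, GridInv]
  | cons r rs' ih =>
    intro a t
    simp only [gsOf]
    apply gridinv_cons_intro
    · constructor
      · exact fun h => h
      · cases hnq : nqb r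
        · refine Or.inr ?_
          have hfex : ∃ h, altFill r = some h := by
            cases hf : altFill r with
            | none => exact absurd ((fill_none_iff r).1 hf) (by simp [hnq])
            | some h => exact ⟨h, rfl⟩
          obtain ⟨h, hf⟩ := hfex
          rw [hf]
          simpa using fill_ok hf
        · exact Or.inl rfl
    · exact ih _ _

theorem cnt_cons (r : List String) (rest : List (List String)) :
    cnt (r :: rest) = (if nqb r then 1 else 0) + cnt rest := by
  simp [cnt, List.countP_cons]
  by_cases h : nqb r <;> simp [h, Nat.add_comm]

theorem copy_cons_noq {s : List String} (h : "?" ∉ s) (p : List String)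
    (rest : List (List String)) :
    pvCopyScan p (s :: rest) = (s :: (pvCopyScan s rest).1, (pvCopyScan s rest).2) := by
  simp only [pvCopyScan, if_neg h]

theorem copy_cons_mixed {s : List String} (hq : "?" ∈ s) (hnq : nqb s = false)
    (p : List String) (rest : List (List String)) :
    pvCopyScan p (s :: rest) = (s :: (pvCopyScan s rest).1, true) := by
  have hset : ¬((PySem.Set.ofList s).length = 1) := by
    intro h
    rw [(condA_iff s).1 ⟨hq, h⟩] at hnq
    exact Bool.true_eq_false.mp hnq
  simp only [pvCopyScan, if_pos hq, if_neg hset]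

theorem copy_cons_above {s p : List String} (hs : nqb s = true) (hp : nqb p = false)
    (rest : List (List String)) :
    pvCopyScan p (s :: rest) = (p :: (pvCopyScan p rest).1, true) := by
  obtain ⟨hq, hset⟩ := (condA_iff s).2 hs
  have hc2 : (PySem.Set.ofList p).length ≠ 1 ∨ PySem.List.pyGet? p 0 ≠ some "?" :=
    (condPrev_iff p).2 hp
  simp only [pvCopyScan, if_pos hq, if_pos hset, if_pos hc2]

theorem copy_cons_last {s p : List String} (hs : nqb s = true) (hp : nqb p = true) :
    pvCopyScan p [s] = ([s], true) := by
  obtain ⟨hq, hset⟩ := (condA_iff s).2 hs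
  have hc2 : ¬((PySem.Set.ofList p).length ≠ 1 ∨ PySem.List.pyGet? p 0 ≠ some "?") := by
    intro h
    have h' := (condPrev_iff p).1 h
    rw [hp] at h'
    exact absurd h' (by simp)
  simp only [pvCopyScan, if_pos hq, if_pos hset, if_neg hc2]

theorem copy_cons_below {s p nxt : List String} (hs : nqb s = true) (hp : nqb p = true)
    (rest' : List (List String)) :
    pvCopyScan p (s :: nxt :: rest') = (nxt :: (pvCopyScan nxt (nxt :: rest')).1, true) := by
  obtain ⟨hq, hset⟩ := (condA_iff s).2 hs
  have hc2 : ¬((PySem.Set.ofList p).length ≠ 1 ∨ PySem.List.pyGet? p 0 ≠ some "?") := by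
    intro h
    have h' := (condPrev_iff p).1 h
    rw [hp] at h'
    exact absurd h' (by simp)
  simp only [pvCopyScan, if_pos hq, if_pos hset, if_neg hc2]

theorem copyScan_cnt : ∀ (rest : List (List String)) (p : List String),
    cnt (pvCopyScan p rest).1 ≤ cnt rest ∧
    (nqb p = false → (∃ r ∈ rest, nqb r = true) → cnt (pvCopyScan p rest).1 < cnt rest) ∧
    (nqb p = true → (∃ r ∈ rest, nqb r = true) → (∃ r ∈ rest, nqb r = false) →
      cnt (pvCopyScan p rest).1 < cnt rest) := by
  intro rest
  induction rest with
  | nil =>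
    intro p
    refine ⟨le_refl _, fun _ h => ?_, fun _ h _ => ?_⟩ <;> simp at h
  | cons s rest' ih =>
    intro p
    by_cases hnq : nqb s = true
    · by_cases hp : nqb p = true
      · cases rest' with
        | nil =>
          rw [copy_cons_last hnq hp]
          refine ⟨le_refl _, fun hp' => by simp [hp] at hp', fun _ _ hex => ?_⟩
          rcases hex with ⟨r, hr, hrf⟩
          simp at hr
          rw [hr, hnq] at hrf
          exact absurd hrf (by simp)
        | cons nxt rest'' =>
          rw [copy_cons_below hnq hp]
          have ihn := ih nxt
          have hle := ihn.1
          have e1 := cnt_cons nxt (pvCopyScan nxt (nxt :: rest'')).1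
          have e2 : cnt (s :: nxt :: rest'') = 1 + cnt (nxt :: rest'') := by
            rw [cnt_cons, if_pos hnq]
          refine ⟨?_, fun hp' => by rw [hp] at hp'; exact absurd hp' (by simp),
            fun _ _ hex => ?_⟩
          · by_cases hx : nqb nxt = true
            · rw [e1, if_pos hx, e2]; omega
            · rw [e1, if_neg hx, e2]; omega
          · by_cases hx : nqb nxt = true
            · have hex' : ∃ r ∈ nxt :: rest'', nqb r = false := by
                rcases hex with ⟨r, hr, hrf⟩
                rcases List.mem_cons.1 hr with rfl | hr'
                · rw [hnq] at hrf; exact absurd hrf (by simp)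
                · exact ⟨r, hr', hrf⟩
              have hlt := ihn.2.2 hx ⟨nxt, by simp, hx⟩ hex'
              rw [e1, if_pos hx, e2]; omega
            · rw [e1, if_neg hx, e2]; omega
      · have hp' : nqb p = false := by simpa using hp
        rw [copy_cons_above hnq hp']
        have ihp := ih p
        have hle := ihp.1
        rw [cnt_cons, cnt_cons, if_pos hnq, if_neg (by simp [hp'] : ¬ nqb p = true)]
        refine ⟨by omega, fun _ _ => by omega, fun hpp => by rw [hp'] at hpp; exact absurd hpp (by simp)⟩
    · have hnq' : nqb s = false := by simpa using hnq
      have heq : (pvCopyScan p (s :: rest')).1 = s :: (pvCopyScan s rest').1 := by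
        by_cases hq : "?" ∈ s
        · rw [copy_cons_mixed hq hnq']
        · rw [copy_cons_noq hq]
      rw [heq, cnt_cons, cnt_cons, if_neg (by simp [hnq'] : ¬ nqb s = true)]
      have ihs := ih s
      have hle := ihs.1
      refine ⟨by omega, fun _ hex => ?_, fun _ hex hex2 => ?_⟩
      · have hex' : ∃ r ∈ rest', nqb r = true := by
          rcases hex with ⟨r, hr, hrf⟩
          rcases List.mem_cons.1 hr with rfl | hr'
          · rw [hnq'] at hrf; exact absurd hrf (by simp)
          · exact ⟨r, hr', hrf⟩
        have := ihs.2.1 hnq' hex'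
        omega
      · have hex' : ∃ r ∈ rest', nqb r = true := by
          rcases hex with ⟨r, hr, hrf⟩
          rcases List.mem_cons.1 hr with rfl | hr'
          · rw [hnq'] at hrf; exact absurd hrf (by simp)
          · exact ⟨r, hr', hrf⟩
        have := ihs.2.1 hnq' hex'
        omega

theorem copyScan_go_false : ∀ (rest : List (List String)) (p : List String),
    (pvCopyScan p rest).2 = false → (∀ r ∈ rest, "?" ∉ r) ∧ (pvCopyScan p rest).1 = rest := by
  intro rest
  induction rest with
  | nil => intro p _; exact ⟨by simp, rfl⟩
  | cons s rest' ih =>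
    intro p hgo
    by_cases hq : "?" ∈ s
    · exfalso
      by_cases hnq : nqb s = true
      · by_cases hp : nqb p = true
        · cases rest' with
          | nil => rw [copy_cons_last hnq hp] at hgo; simp at hgo
          | cons nxt rest'' => rw [copy_cons_below hnq hp] at hgo; simp at hgo
        · rw [copy_cons_above hnq (by simpa using hp)] at hgo; simp at hgo
      · rw [copy_cons_mixed hq (by simpa using hnq)] at hgo; simp at hgo
    · rw [copy_cons_noq hq] at hgo ⊢
      simp only at hgo
      obtain ⟨h1, h2⟩ := ih s hgo
      exact ⟨by
        intro r hr
        rcases List.mem_cons.1 hr with rfl | hr'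
        · exact hq
        · exact h1 r hr', by simp [h2]⟩

theorem copyScan_go_true : ∀ (rest : List (List String)) (p : List String),
    (pvCopyScan p rest).2 = true → ∃ r ∈ rest, "?" ∈ r := by
  intro rest
  induction rest with
  | nil => intro p h; simp [pvCopyScan] at h
  | cons s rest' ih =>
    intro p hgo
    by_cases hq : "?" ∈ s
    · exact ⟨s, by simp, hq⟩
    · rw [copy_cons_noq hq] at hgo
      simp only at hgo
      rcases ih s hgo with ⟨r, hr, hrq⟩
      exact ⟨r, List.mem_cons_of_mem _ hr, hrq⟩

theorem copyScan_inv : ∀ (ss rs gs : List (List String)) (sp rp gp : List String) (AB : Prop),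
    GridInv rs gs ss →
    Chain (some gp) AB rs gs →
    RowInv rp gp sp →
    (nqb sp = true → AB) →
    GridInv rs gs (pvCopyScan sp ss).1 := by
  intro ss
  induction ss with
  | nil =>
    intro rs gs sp rp gp AB hgrid _ _ _
    cases rs with
    | nil => cases gs with
      | nil => exact hgrid
      | cons g gs' => simp [GridInv] at hgrid
    | cons r rs' => cases gs with
      | nil => simp [GridInv] at hgrid
      | cons g gs' => simp [GridInv] at hgrid
  | cons s ss' ih =>
    intro rs gs sp rp gp AB hgrid hchain hrowp hab
    cases rs with
    | nil => simp [GridInv] at hgrid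
    | cons r rs' =>
      cases gs with
      | nil => simp [GridInv] at hgrid
      | cons g gs' =>
        obtain ⟨hrow, hgrid'⟩ := gridinv_cons_elim hgrid
        obtain ⟨hc1, hc2, hc3⟩ := chain_cons_elim hchain
        by_cases hnq : nqb s = true
        · by_cases hp : nqb sp = true
          · cases ss' with
            | nil =>
              rw [copy_cons_last hnq hp]
              exact hgrid
            | cons nxt ss'' =>
              rw [copy_cons_below hnq hp]
              have hbr : nqb r = true := hrow.1 hnq
              have hAB : AB := hab hp
              cases rs' with
              | nil => simp [GridInv] at hgrid'
              | cons r2 rs'' =>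
                cases gs' with
                | nil => simp [GridInv] at hgrid'
                | cons g2 gs'' =>
                  obtain ⟨hrow2, _⟩ := gridinv_cons_elim hgrid'
                  have hg2 : g = g2 := hc2 hAB hbr g2 (by simp)
                  have hrownew : RowInv r g nxt := by
                    constructor
                    · intro _; exact hbr
                    · rcases hrow2.2 with h | h
                      · exact Or.inl h
                      · exact Or.inr (hg2 ▸ h)
                  apply gridinv_cons_intro hrownew
                  exact ih (r2 :: rs'') (g2 :: gs'') nxt r g (AB ∧ nqb r = true)
                    hgrid' hc3 hrownew (fun _ => ⟨hAB, hbr⟩)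
          · have hp' : nqb sp = false := by simpa using hp
            rw [copy_cons_above hnq hp']
            have hbr : nqb r = true := hrow.1 hnq
            have hOk : OkRow none true gp sp := by
              rcases hrowp.2 with h | h
              · rw [hp'] at h; exact absurd h (by simp)
              · exact h
            have hg : g = gp := hc1 hbr gp rfl
            have hrownew : RowInv r g sp := by
              constructor
              · intro h'; rw [hp'] at h'; exact absurd h' (by simp)
              · exact Or.inr (hg ▸ hOk)
            apply gridinv_cons_intro hrownew
            exact ih rs' gs' sp r g (AB ∧ nqb r = true) hgrid' hc3 hrownew
              (fun h' => by rw [hp'] at h'; exact absurd h' (by simp))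
        · have hnq' : nqb s = false := by simpa using hnq
          have heq : (pvCopyScan sp (s :: ss')).1 = s :: (pvCopyScan s ss').1 := by
            by_cases hq : "?" ∈ s
            · rw [copy_cons_mixed hq hnq']
            · rw [copy_cons_noq hq]
          rw [heq]
          apply gridinv_cons_intro hrow
          exact ih rs' gs' s r g (AB ∧ nqb r = true) hgrid' hc3 hrow
            (fun h' => by rw [hnq'] at h'; exact absurd h' (by simp))

theorem copyScan_id : ∀ (rest : List (List String)) (p : List String),
    (∀ r ∈ rest, nqb r = false) → (pvCopyScan p rest).1 = rest := by
  intro rest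
  induction rest with
  | nil => intro p _; rfl
  | cons s rest' ih =>
    intro p h
    have hs : nqb s = false := h s (by simp)
    have heq : (pvCopyScan p (s :: rest')).1 = s :: (pvCopyScan s rest').1 := by
      by_cases hq : "?" ∈ s
      · rw [copy_cons_mixed hq hs]
      · rw [copy_cons_noq hq]
    rw [heq, ih s (fun r hr => h r (List.mem_cons_of_mem _ hr))]

theorem pvPass_noq {x : List String} {xs : List (List String)}
    (h : "?" ∉ pvRowPass x) :
    pvPass (x :: xs) =
      ((pvRowPass x) :: (pvCopyScan (pvRowPass x) (xs.map pvRowPass)).1,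
        (pvCopyScan (pvRowPass x) (xs.map pvRowPass)).2) := by
  simp only [pvPass, List.map_cons, if_neg h]

theorem pvPass_mixed {x : List String} {xs : List (List String)}
    (hq : "?" ∈ pvRowPass x) (hnq : nqb (pvRowPass x) = false) :
    pvPass (x :: xs) =
      ((pvRowPass x) :: (pvCopyScan (pvRowPass x) (xs.map pvRowPass)).1, true) := by
  have hset : ¬((PySem.Set.ofList (pvRowPass x)).length = 1) := by
    intro h
    rw [(condA_iff _).1 ⟨hq, h⟩] at hnq
    exact Bool.true_eq_false.mp hnq
  simp only [pvPass, List.map_cons, if_pos hq, if_neg hset]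

theorem pvPass_blank_nil {x : List String} (hnq : nqb (pvRowPass x) = true) :
    pvPass [x] = ([pvRowPass x], true) := by
  obtain ⟨hq, hset⟩ := (condA_iff _).2 hnq
  simp only [pvPass, List.map_cons, List.map_nil, if_pos hq, if_pos hset]
  rfl

theorem pvPass_blank_cons {x y : List String} {xs : List (List String)}
    (hnq : nqb (pvRowPass x) = true) :
    pvPass (x :: y :: xs) =
      ((pvRowPass y) :: (pvCopyScan (pvRowPass y) ((y :: xs).map pvRowPass)).1, true) := by
  obtain ⟨hq, hset⟩ := (condA_iff _).2 hnq
  simp only [pvPass, List.map_cons, if_pos hq, if_pos hset]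

theorem gridinv_map_rowPass : ∀ (rs gs ss : List (List String)),
    GridInv rs gs ss → GridInv rs gs (ss.map pvRowPass) := by
  intro rs
  induction rs with
  | nil =>
    intro gs ss h
    cases gs with
    | nil => cases ss with
      | nil => exact h
      | cons s t => simp [GridInv] at h
    | cons g gs' => cases ss with
      | nil => simp [GridInv] at h
      | cons s t => simp [GridInv] at h
  | cons r rs' ih =>
    intro gs ss h
    cases gs with
    | nil => cases ss with
      | nil => simp [GridInv] at h
      | cons s t => simp [GridInv] at h
    | cons g gs' =>
      cases ss with
      | nil => simp [GridInv] at h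
      | cons s ss' =>
        obtain ⟨hrow, hgrid'⟩ := gridinv_cons_elim h
        simp only [List.map_cons]
        apply gridinv_cons_intro
        · constructor
          · rw [rowPass_nq]; exact hrow.1
          · rcases hrow.2 with h' | h'
            · exact Or.inl (by rw [rowPass_nq]; exact h')
            · exact Or.inr (rowPass_ok h')
        · exact ih gs' ss' hgrid'

theorem gridinv_noq : ∀ (rs gs ss : List (List String)),
    GridInv rs gs ss → (∀ s ∈ ss, "?" ∉ s) → ss = gs := by
  intro rs
  induction rs with
  | nil =>
    intro gs ss h _
    cases gs with
    | nil => cases ss with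
      | nil => rfl
      | cons s t => simp [GridInv] at h
    | cons g gs' => cases ss with
      | nil => simp [GridInv] at h
      | cons s t => simp [GridInv] at h
  | cons r rs' ih =>
    intro gs ss h hq
    cases gs with
    | nil => cases ss with
      | nil => simp [GridInv] at h
      | cons s t => simp [GridInv] at h
    | cons g gs' =>
      cases ss with
      | nil => simp [GridInv] at h
      | cons s ss' =>
        obtain ⟨hrow, hgrid'⟩ := gridinv_cons_elim h
        have hs : "?" ∉ s := hq s (by simp)
        have hOk : OkRow none true g s := by
          rcases hrow.2 with h' | h'
          · exact absurd (nq_has_q h') hs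
          · exact h'
        rw [okrow_noq g s none true hOk hs,
          ih gs' ss' hgrid' (fun x hx => hq x (List.mem_cons_of_mem _ hx))]

theorem gridinv_len : ∀ (rs gs ss : List (List String)),
    GridInv rs gs ss → gs.length = rs.length ∧ ss.length = rs.length := by
  intro rs
  induction rs with
  | nil =>
    intro gs ss h
    cases gs with
    | nil => cases ss with
      | nil => exact ⟨rfl, rfl⟩
      | cons s t => simp [GridInv] at h
    | cons g gs' => cases ss with
      | nil => simp [GridInv] at h
      | cons s t => simp [GridInv] at h
  | cons r rs' ih =>
    intro gs ss h
    cases gs with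
    | nil => cases ss with
      | nil => simp [GridInv] at h
      | cons s t => simp [GridInv] at h
    | cons g gs' =>
      cases ss with
      | nil => simp [GridInv] at h
      | cons s ss' =>
        obtain ⟨_, hgrid'⟩ := gridinv_cons_elim h
        obtain ⟨h1, h2⟩ := ih gs' ss' hgrid'
        exact ⟨by simp [h1], by simp [h2]⟩

theorem gridinv_exists_nonNQ : ∀ (rs gs ss : List (List String)),
    GridInv rs gs ss → (∃ r ∈ rs, nqb r = false) → ∃ s ∈ ss, nqb s = false := by
  intro rs
  induction rs with
  | nil => intro gs ss _ hex; simp at hex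
  | cons r rs' ih =>
    intro gs ss h hex
    cases gs with
    | nil => simp [GridInv] at h
    | cons g gs' =>
      cases ss with
      | nil => simp [GridInv] at h
      | cons s ss' =>
        obtain ⟨hrow, hgrid'⟩ := gridinv_cons_elim h
        rcases hex with ⟨r', hr', hrf⟩
        rcases List.mem_cons.1 hr' with rfl | hr''
        · refine ⟨s, by simp, ?_⟩
          cases hns : nqb s
          · rfl
          · rw [hrow.1 hns] at hrf; exact absurd hrf (by simp)
        · rcases ih gs' ss' hgrid' ⟨r', hr'', hrf⟩ with ⟨s', hs', hsf⟩
          exact ⟨s', List.mem_cons_of_mem _ hs', hsf⟩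

theorem qsum_cons (s : List String) (ss : List (List String)) :
    qsum (s :: ss) = (if nqb s then 0 else cq s) + qsum ss := by
  simp [qsum]

theorem qsum_le_glen : ∀ (rs gs ss : List (List String)),
    GridInv rs gs ss → qsum ss ≤ (gs.map List.length).sum := by
  intro rs
  induction rs with
  | nil =>
    intro gs ss h
    cases gs with
    | nil => cases ss with
      | nil => simp [qsum]
      | cons s t => simp [GridInv] at h
    | cons g gs' => cases ss with
      | nil => simp [GridInv] at h
      | cons s t => simp [GridInv] at h
  | cons r rs' ih =>
    intro gs ss h
    cases gs with
    | nil => cases ss with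
      | nil => simp [GridInv] at h
      | cons s t => simp [GridInv] at h
    | cons g gs' =>
      cases ss with
      | nil => simp [GridInv] at h
      | cons s ss' =>
        obtain ⟨hrow, hgrid'⟩ := gridinv_cons_elim h
        rw [qsum_cons]
        simp only [List.map_cons, List.sum_cons]
        have htail := ih gs' ss' hgrid'
        have hhead : (if nqb s then 0 else cq s) ≤ g.length := by
          by_cases hns : nqb s = true
          · simp [hns]
          · have hOk : OkRow none true g s := by
              rcases hrow.2 with h' | h'
              · exact absurd h' hns
              · exact h'
            have hlen := okrow_len g s none true hOk
            have : cq s ≤ s.length := List.count_le_length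
            simp [hns]
            omega
        omega

theorem le_foldl_max_init : ∀ (l : List Nat) (a : Nat), a ≤ l.foldl Nat.max a := by
  intro l
  induction l with
  | nil => intro a; simp
  | cons x xs ih =>
    intro a
    simp only [List.foldl_cons]
    exact le_trans (Nat.le_max_left a x) (ih (Nat.max a x))

theorem le_foldl_max : ∀ (l : List Nat) (a x : Nat), x ∈ l → x ≤ l.foldl Nat.max a := by
  intro l
  induction l with
  | nil => intro a x h; simp at h
  | cons y ys ih =>
    intro a x h
    rcases List.mem_cons.1 h with rfl | h'
    · simp only [List.foldl_cons]
      exact le_trans (Nat.le_max_right a x) (le_foldl_max_init ys (Nat.max a x))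
    · exact ih (Nat.max a y) x h'

theorem mem_le_maxLen {m : List (List String)} {r : List String} (h : r ∈ m) :
    r.length ≤ pvMaxLen m := le_foldl_max _ 0 _ (List.mem_map_of_mem h)

theorem fill_length {r g : List String} (h : altFill r = some g) : g.length = r.length := by
  unfold altFill at h
  cases hf : r.find? (fun c => c ≠ "?") with
  | none =>
    rw [hf] at h
    by_cases hr : r = []
    · subst hr; simp at h; subst h; rfl
    · simp [hr] at h
  | some f =>
    rw [hf] at h
    simp at h
    subst h
    exact altGo_length r f none

theorem up_snd_mem : ∀ (l : List (Option (List String))),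
    (altUp l).2 = none ∨ (altUp l).2 ∈ l := by
  intro l
  induction l with
  | nil => exact Or.inl rfl
  | cons x xs ih =>
    cases x with
    | none =>
      simp only [altUp]
      rcases ih with h | h
      · exact Or.inl h
      · exact Or.inr (List.mem_cons_of_mem _ h)
    | some r => exact Or.inr (by simp [altUp])

theorem up_mem : ∀ (l : List (Option (List String))) (o : Option (List String)),
    o ∈ (altUp l).1 → o ∈ l ∨ o = none := by
  intro l
  induction l with
  | nil => intro o h; simp [altUp] at h
  | cons x xs ih =>
    intro o h
    cases x with
    | none =>
      simp only [altUp] at h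
      rcases List.mem_cons.1 h with rfl | h'
      · rcases up_snd_mem xs with h'' | h''
        · exact Or.inr h''
        · exact Or.inl (List.mem_cons_of_mem _ h'')
      · rcases ih o h' with h'' | h''
        · exact Or.inl (List.mem_cons_of_mem _ h'')
        · exact Or.inr h''
    | some r =>
      simp only [altUp] at h
      rcases List.mem_cons.1 h with rfl | h'
      · exact Or.inl (by simp)
      · rcases ih o h' with h'' | h''
        · exact Or.inl (List.mem_cons_of_mem _ h'')
        · exact Or.inr h''

theorem target_len_le (m : List (List String)) :
    ∀ g ∈ targetGrid m, g.length ≤ pvMaxLen m := by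
  intro g hg
  unfold targetGrid at hg
  rcases List.mem_map.1 hg with ⟨o, ho, rfl⟩
  rcases up_mem _ o ho with h | rfl
  · rcases down_mem _ none o h with h' | rfl
    · rcases List.mem_map.1 h' with ⟨r, hr, hfo⟩
      cases o with
      | none => simp
      | some g' =>
        rw [Option.getD_some, fill_length hfo]
        exact mem_le_maxLen hr
    · simp
  · simp

theorem sum_map_le {gs : List (List String)} {M : Nat}
    (h : ∀ g ∈ gs, g.length ≤ M) : (gs.map List.length).sum ≤ gs.length * M := by
  induction gs with
  | nil => simp
  | cons g gs' ih =>
    simp only [List.map_cons, List.sum_cons, List.length_cons]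
    have h1 := h g (by simp)
    have h2 := ih (fun x hx => h x (List.mem_cons_of_mem _ hx))
    have : (gs'.length + 1) * M = gs'.length * M + M := by ring
    omega

theorem cnt_map_rowPass : ∀ (ss : List (List String)), cnt (ss.map pvRowPass) = cnt ss := by
  intro ss
  induction ss with
  | nil => rfl
  | cons s ss' ih =>
    simp only [List.map_cons]
    rw [cnt_cons, cnt_cons, rowPass_nq, ih]

theorem qsum_map_rowPass_le : ∀ (ss : List (List String)), qsum (ss.map pvRowPass) ≤ qsum ss := by
  intro ss
  induction ss with
  | nil => simp [qsum]
  | cons s ss' ih =>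
    simp only [List.map_cons]
    rw [qsum_cons, qsum_cons, rowPass_nq]
    have := rowPass_cq_le s
    by_cases h : nqb s = true
    · simp [h]; omega
    · have h' : nqb s = false := by simpa using h
      rw [h']
      simp only [Bool.false_eq_true, if_false]
      omega

theorem qsum_map_rowPass_lt : ∀ (ss : List (List String)),
    (∃ s ∈ ss, nqb s = false ∧ "?" ∈ pvRowPass s) →
    qsum (ss.map pvRowPass) < qsum ss := by
  intro ss
  induction ss with
  | nil => intro h; simp at h
  | cons s ss' ih =>
    intro hex
    simp only [List.map_cons]
    rw [qsum_cons, qsum_cons, rowPass_nq]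
    rcases hex with ⟨w, hw, hwf, hwq⟩
    rcases List.mem_cons.1 hw with rfl | hw'
    · have h1 := rowPass_progress hwf hwq
      have h2 := qsum_map_rowPass_le ss'
      rw [hwf, if_neg Bool.false_ne_true, if_neg Bool.false_ne_true]
      omega
    · have h1 := ih ⟨w, hw', hwf, hwq⟩
      have h2 := rowPass_cq_le s
      by_cases h : nqb s = true
      · simp [h]; omega
      · have h' : nqb s = false := by simpa using h
        rw [h', if_neg Bool.false_ne_true, if_neg Bool.false_ne_true]
        omega

theorem mu_step_lt {w c2 q2 c1 q1 : Nat} (hw : 0 < w) (hq2 : q2 ≤ w - 1) (hc : c2 < c1) :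
    w * c2 + q2 < w * c1 + q1 := by
  have h1 : w * (c2 + 1) ≤ w * c1 := Nat.mul_le_mul (Nat.le_refl w) hc
  have h2 : w * (c2 + 1) = w * c2 + w := by ring
  omega

theorem pass_inv {m G : List (List String)} (hch : Chain none True m G) :
    ∀ {ss : List (List String)}, GridInv m G ss → ss ≠ [] → GridInv m G (pvPass ss).1 := by
  intro ss hgr hne
  cases ss with
  | nil => exact absurd rfl hne
  | cons x xs =>
    have hS1 : GridInv m G (pvRowPass x :: xs.map pvRowPass) := by
      have := gridinv_map_rowPass m G (x :: xs) hgr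
      simpa using this
    cases m with
    | nil => simp [GridInv] at hS1
    | cons r0 rs' =>
      cases G with
      | nil => simp [GridInv] at hS1
      | cons g0 gs' =>
        obtain ⟨hrow0, hgrid'⟩ := gridinv_cons_elim hS1
        obtain ⟨_, hc2, hc3⟩ := chain_cons_elim hch
        by_cases hnq : nqb (pvRowPass x) = true
        · cases xs with
          | nil =>
            rw [pvPass_blank_nil hnq]
            exact gridinv_cons_intro hrow0 hgrid'
          | cons y ys =>
            rw [pvPass_blank_cons hnq]
            have hbr0 : nqb r0 = true := hrow0.1 hnq
            cases rs' with
            | nil => simp [GridInv] at hgrid'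
            | cons rA rs'' =>
              cases gs' with
              | nil => simp [GridInv] at hgrid'
              | cons gA gs'' =>
                obtain ⟨hrowA, _⟩ := gridinv_cons_elim hgrid'
                have hg0A : g0 = gA := hc2 trivial hbr0 gA (by simp)
                have hrownew : RowInv r0 g0 (pvRowPass y) := by
                  constructor
                  · intro _; exact hbr0
                  · rcases hrowA.2 with h' | h'
                    · exact Or.inl h'
                    · exact Or.inr (hg0A ▸ h')
                apply gridinv_cons_intro hrownew
                exact copyScan_inv ((y :: ys).map pvRowPass) (rA :: rs'') (gA :: gs'')
                  (pvRowPass y) r0 g0 (True ∧ nqb r0 = true) hgrid' hc3 hrownew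
                  (fun _ => ⟨trivial, hbr0⟩)
        · have hnq' : nqb (pvRowPass x) = false := by simpa using hnq
          have hrest : GridInv rs' gs' ((pvPass (x :: xs)).1.tail) → True := fun _ => trivial
          have heq : (pvPass (x :: xs)).1 =
              pvRowPass x :: (pvCopyScan (pvRowPass x) (xs.map pvRowPass)).1 := by
            by_cases hq : "?" ∈ pvRowPass x
            · rw [pvPass_mixed hq hnq']
            · rw [pvPass_noq hq]
          rw [heq]
          apply gridinv_cons_intro hrow0
          exact copyScan_inv (xs.map pvRowPass) rs' gs' (pvRowPass x) r0 g0
            (True ∧ nqb r0 = true) hgrid' hc3 hrow0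
            (fun h' => by rw [hnq'] at h'; exact absurd h' (by simp))

theorem pass_ne_nil {ss : List (List String)} (hne : ss ≠ []) : (pvPass ss).1 ≠ [] := by
  cases ss with
  | nil => exact absurd rfl hne
  | cons x xs =>
    by_cases hnq : nqb (pvRowPass x) = true
    · cases xs with
      | nil => rw [pvPass_blank_nil hnq]; simp
      | cons y ys => rw [pvPass_blank_cons hnq]; simp
    · have hnq' : nqb (pvRowPass x) = false := by simpa using hnq
      by_cases hq : "?" ∈ pvRowPass x
      · rw [pvPass_mixed hq hnq']; simp
      · rw [pvPass_noq hq]; simp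

theorem pass_go_false {m G ss : List (List String)} (hgr : GridInv m G ss) (hne : ss ≠ [])
    (hgo : (pvPass ss).2 = false) : (pvPass ss).1 = G := by
  cases ss with
  | nil => exact absurd rfl hne
  | cons x xs =>
    have hS1 : GridInv m G (pvRowPass x :: xs.map pvRowPass) := by
      have := gridinv_map_rowPass m G (x :: xs) hgr
      simpa using this
    by_cases hq : "?" ∈ pvRowPass x
    · exfalso
      by_cases hnq : nqb (pvRowPass x) = true
      · cases xs with
        | nil => rw [pvPass_blank_nil hnq] at hgo; simp at hgo
        | cons y ys => rw [pvPass_blank_cons hnq] at hgo; simp at hgo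
      · rw [pvPass_mixed hq (by simpa using hnq)] at hgo; simp at hgo
    · rw [pvPass_noq hq] at hgo ⊢
      simp only at hgo
      obtain ⟨h1, h2⟩ := copyScan_go_false (xs.map pvRowPass) (pvRowPass x) hgo
      simp only [h2]
      apply gridinv_noq m G _ hS1
      intro s hs
      rcases List.mem_cons.1 hs with rfl | hs'
      · exact hq
      · exact h1 s hs'

theorem pass_dec {m G ss : List (List String)} (hch : Chain none True m G)
    (hgr : GridInv m G ss) (hGlen : ∀ g ∈ G, g.length ≤ pvMaxLen m)
    (hex : ∃ r ∈ m, nqb r = false) (hne : ss ≠ []) (hgo : (pvPass ss).2 = true) :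
    mu m (pvPass ss).1 < mu m ss := by
  cases ss with
  | nil => exact absurd rfl hne
  | cons x xs =>
    have hS1 : GridInv m G (pvRowPass x :: xs.map pvRowPass) := by
      have := gridinv_map_rowPass m G (x :: xs) hgr
      simpa using this
    have hcnt_eq : cnt (pvRowPass x :: xs.map pvRowPass) = cnt (x :: xs) := by
      have := cnt_map_rowPass (x :: xs)
      simpa using this
    have hqs_le : qsum (pvRowPass x :: xs.map pvRowPass) ≤ qsum (x :: xs) := by
      have := qsum_map_rowPass_le (x :: xs)
      simpa using this
    have hexS1 : ∃ s ∈ pvRowPass x :: xs.map pvRowPass, nqb s = false := by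
      have := gridinv_exists_nonNQ m G _ hS1 hex
      exact this
    have hGlenR : G.length = m.length := (gridinv_len m G (x :: xs) hgr).1
    have hw : 0 < m.length * pvMaxLen m + 1 := Nat.succ_pos _
    by_cases hNQ : ∃ s ∈ pvRowPass x :: xs.map pvRowPass, nqb s = true
    · -- some all-'?' row survives the row passes: the copy phase removes one
      have hq2 : qsum (pvPass (x :: xs)).1 ≤ m.length * pvMaxLen m := by
        have hpi : GridInv m G (pvPass (x :: xs)).1 := pass_inv hch hgr (by simp)
        have h1 := qsum_le_glen m G _ hpi
        have h2 := sum_map_le hGlen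
        rw [hGlenR] at h2
        omega
      have hkey : cnt (pvPass (x :: xs)).1 < cnt (pvRowPass x :: xs.map pvRowPass) := by
        by_cases hnq : nqb (pvRowPass x) = true
        · cases xs with
          | nil =>
            exfalso
            rcases hexS1 with ⟨s, hs, hsf⟩
            simp at hs
            rw [hs, hnq] at hsf
            exact absurd hsf (by simp)
          | cons y ys =>
            rw [pvPass_blank_cons hnq]
            have hcS1 : cnt (pvRowPass x :: (y :: ys).map pvRowPass) =
                1 + cnt ((y :: ys).map pvRowPass) := by
              rw [cnt_cons, if_pos hnq]
            rw [hcS1, cnt_cons]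
            have hC := copyScan_cnt ((y :: ys).map pvRowPass) (pvRowPass y)
            by_cases hr1 : nqb (pvRowPass y) = true
            · have hexNon : ∃ r ∈ (y :: ys).map pvRowPass, nqb r = false := by
                rcases hexS1 with ⟨s, hs, hsf⟩
                rcases List.mem_cons.1 hs with rfl | hs'
                · rw [hnq] at hsf; exact absurd hsf (by simp)
                · exact ⟨s, hs', hsf⟩
              have hlt := hC.2.2 hr1 ⟨pvRowPass y, by simp, hr1⟩ hexNon
              rw [if_pos hr1]
              omega
            · have hle := hC.1
              rw [if_neg hr1]
              omega
        · have hnq' : nqb (pvRowPass x) = false := by simpa using hnq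
          have heq : (pvPass (x :: xs)).1 =
              pvRowPass x :: (pvCopyScan (pvRowPass x) (xs.map pvRowPass)).1 := by
            by_cases hq : "?" ∈ pvRowPass x
            · rw [pvPass_mixed hq hnq']
            · rw [pvPass_noq hq]
          rw [heq, cnt_cons, cnt_cons, if_neg (by simp [hnq'] : ¬ nqb (pvRowPass x) = true)]
          have hexQ : ∃ r ∈ xs.map pvRowPass, nqb r = true := by
            rcases hNQ with ⟨s, hs, hsf⟩
            rcases List.mem_cons.1 hs with rfl | hs'
            · rw [hnq'] at hsf; exact absurd hsf (by simp)
            · exact ⟨s, hs', hsf⟩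
          have hlt := (copyScan_cnt (xs.map pvRowPass) (pvRowPass x)).2.1 hnq' hexQ
          omega
      show (m.length * pvMaxLen m + 1) * cnt (pvPass (x :: xs)).1 + qsum (pvPass (x :: xs)).1 <
        (m.length * pvMaxLen m + 1) * cnt (x :: xs) + qsum (x :: xs)
      rw [← hcnt_eq]
      exact mu_step_lt hw (by omega) hkey
    · -- no all-'?' row left: some row still sheds a '?' during its row pass
      push Not at hNQ
      have hall : ∀ s ∈ pvRowPass x :: xs.map pvRowPass, nqb s = false := by
        intro s hs
        simpa using hNQ s hs
      have hnq' : nqb (pvRowPass x) = false := hall _ (by simp)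
      have heq : (pvPass (x :: xs)).1 =
          pvRowPass x :: (pvCopyScan (pvRowPass x) (xs.map pvRowPass)).1 := by
        by_cases hq : "?" ∈ pvRowPass x
        · rw [pvPass_mixed hq hnq']
        · rw [pvPass_noq hq]
      have hid : (pvCopyScan (pvRowPass x) (xs.map pvRowPass)).1 = xs.map pvRowPass :=
        copyScan_id _ _ (fun r hr => hall r (List.mem_cons_of_mem _ hr))
      have hwit : ∃ s ∈ x :: xs, nqb s = false ∧ "?" ∈ pvRowPass s := by
        by_cases hq : "?" ∈ pvRowPass x
        · exact ⟨x, by simp, by rw [← rowPass_nq]; exact hnq', hq⟩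
        · rw [pvPass_noq hq] at hgo
          simp only at hgo
          rcases copyScan_go_true _ _ hgo with ⟨r, hr, hrq⟩
          rcases List.mem_map.1 hr with ⟨y, hy, rfl⟩
          refine ⟨y, List.mem_cons_of_mem _ hy, ?_, hrq⟩
          rw [← rowPass_nq]
          exact hall _ (List.mem_cons_of_mem _ hr)
      have hqlt : qsum ((x :: xs).map pvRowPass) < qsum (x :: xs) :=
        qsum_map_rowPass_lt (x :: xs) hwit
      show (m.length * pvMaxLen m + 1) * cnt (pvPass (x :: xs)).1 + qsum (pvPass (x :: xs)).1 <
        (m.length * pvMaxLen m + 1) * cnt (x :: xs) + qsum (x :: xs)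
      rw [heq, hid]
      have e1 : cnt (pvRowPass x :: xs.map pvRowPass) = cnt (x :: xs) := hcnt_eq
      have e2 : qsum (pvRowPass x :: xs.map pvRowPass) < qsum (x :: xs) := by
        simpa using hqlt
      rw [e1]
      omega

theorem loop_target {m G : List (List String)} (hch : Chain none True m G)
    (hGlen : ∀ g ∈ G, g.length ≤ pvMaxLen m) (hex : ∃ r ∈ m, nqb r = false) :
    ∀ (n : Nat) (ss : List (List String)), GridInv m G ss → ss ≠ [] → mu m ss < n →
    pvLoop n ss = G := by
  intro n
  induction n with
  | zero => intro ss _ _ hmu; omega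
  | succ n ih =>
    intro ss hgr hne hmu
    cases hgo : (pvPass ss).2
    · simp only [pvLoop, hgo, Bool.false_eq_true, if_false]
      exact pass_go_false hgr hne hgo
    · simp only [pvLoop, hgo, if_true]
      apply ih (pvPass ss).1 (pass_inv hch hgr hne) (pass_ne_nil hne)
      have := pass_dec hch hgr hGlen hex hne hgo
      omega

theorem qsum_le_len : ∀ (ss : List (List String)) (M : Nat),
    (∀ s ∈ ss, s.length ≤ M) → qsum ss ≤ ss.length * M := by
  intro ss
  induction ss with
  | nil => intro M _; simp [qsum]
  | cons s ss' ih =>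
    intro M h
    rw [qsum_cons]
    have h1 : cq s ≤ M := le_trans List.count_le_length (h s (by simp))
    have h2 := ih M (fun x hx => h x (List.mem_cons_of_mem _ hx))
    have h3 : (ss'.length + 1) * M = ss'.length * M + M := by ring
    by_cases hns : nqb s = true
    · simp only [hns, if_true, List.length_cons]
      omega
    · have hns' : nqb s = false := by simpa using hns
      rw [hns', if_neg Bool.false_ne_true]
      simp only [List.length_cons]
      omega

theorem solve_alt_join (m : List (List String)) :
    solve_alt m = PySem.Str.join "\n" ((targetGrid m).map (fun r => PySem.Str.join "" r)) := by
  unfold solve_alt targetGrid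
  rw [List.map_map]
  rfl

theorem solve_spec : Claim_equal_solve := by
  unfold Claim_equal_solve Spec_solve
  intro m _ hpre
  obtain ⟨hne, hex0⟩ := hpre
  have hex : ∃ r ∈ m, nqb r = false := by
    rcases hex0 with ⟨r, hr, hcase⟩
    exact ⟨r, hr, (nqb_false_iff r).2 hcase⟩
  have hch : Chain none True m (targetGrid m) := by
    rw [targetGrid_eq]
    exact chain_gsOf m none none True _ (by intro x hx; simp at hx) (fun _ => rfl) (fun _ => rfl)
  have hinit : GridInv m (targetGrid m) m := by
    rw [targetGrid_eq]
    exact gridinv_init m none _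
  have hGlen := target_len_le m
  have hmu : mu m m < pvFuel m := by
    have h1 : cnt m ≤ m.length := List.countP_le_length
    have h2 : qsum m ≤ m.length * pvMaxLen m :=
      qsum_le_len m (pvMaxLen m) (fun s hs => mem_le_maxLen hs)
    have h3 : (m.length * pvMaxLen m + 1) * cnt m ≤ (m.length * pvMaxLen m + 1) * m.length :=
      Nat.mul_le_mul (Nat.le_refl _) h1
    unfold mu pvFuel
    omega
  have hkey : pvLoop (pvFuel m) m = targetGrid m :=
    loop_target hch hGlen hex (pvFuel m) m hinit hne hmu
  unfold solve
  rw [hkey, solve_alt_join]
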